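-- pv_equiv track=rewrite | github.com/bozic-djordje/rlexp | evals/comp_visualisation_rephrase.py | collect_axes
-- ===== SOURCE A (Python) =====
-- from typing import Dict, List, Tuple
--
-- METRICS_ORDER = ["return", "steps", "goal_first"]
--
-- def collect_axes(
--     json_data: Dict[str, Dict[str, Dict[str, float]]],
--     selected_models: List[str],
-- ) -> Tuple[List[str], List[str], List[str]]:
--     """
--     Returns:
--         models: filtered & ordered list (per config) present in json_data
--         instructions: sorted list of all instructions across selected models
--         metrics: ordered list of base metrics present (METRICS_ORDER first)
--     """
--     models = [m for m in selected_models if m in json_data]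
--
--     instr_set = set()
--     for m in models:
--         instr_set |= set(json_data[m].keys())
--     instructions = sorted(instr_set)
--
--     present = set()
--     for m in models:
--         for instr in json_data[m]:
--             keys = json_data[m][instr].keys()
--             for base in METRICS_ORDER:
--                 if (
--                     f"original_{base}" in keys or
--                     f"syn_{base}" in keys or
--                     (base == "goal_first" and (
--                         "original_goals_first" in keys or "syn_goals_first" in keys))
--                 ):
--                     present.add(base)
--
--     metrics = [m for m in METRICS_ORDER if m in present]
--     return models, instructions, metrics
-- ===== SOURCE B (Python) =====
-- from typing import Dict, List, Tuple
--
-- METRICS_ORDER = ["return", "steps", "goal_first"]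
--
-- def _base_of(key: str) -> str:
--     """Parse a metric key by stripping its source prefix; '' if unrecognised."""
--     if key.startswith("original_"):
--         rest = key[9:]
--     elif key.startswith("syn_"):
--         rest = key[4:]
--     else:
--         return ""
--     return "goal_first" if rest == "goals_first" else rest
--
-- def collect_axes(
--     json_data: Dict[str, Dict[str, Dict[str, float]]],
--     selected_models: List[str],
-- ) -> Tuple[List[str], List[str], List[str]]:
--     models = [m for m in selected_models if m in json_data]
--     instructions = sorted({i for m in models for i in json_data[m]})
--     bases = {_base_of(k) for m in models for d in json_data[m].values() for k in d}
--     return models, instructions, [b for b in METRICS_ORDER if b in bases]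
-- ===== Notes on version B (the rewrite author's own statement) =====
-- stated objective: alternative
-- what changed: A runs a triple-nested loop that, per instruction, CONSTRUCTS the candidate key names f'original_{base}'/f'syn_{base}' for each of the 3 fixed bases and tests them for membership (plus hard-coded goals_first aliases); B goes the opposite direction: staged set comprehensions that PARSE each key actually observed, stripping its 'original_'/'syn_' prefix with startswith/slicing and normalising the 'goals_first' alias, then filter METRICS_ORDER by the parsed set; Pre_ only excludes association lists with duplicate keys, which no Python dict can represent.
import Mathlib
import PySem

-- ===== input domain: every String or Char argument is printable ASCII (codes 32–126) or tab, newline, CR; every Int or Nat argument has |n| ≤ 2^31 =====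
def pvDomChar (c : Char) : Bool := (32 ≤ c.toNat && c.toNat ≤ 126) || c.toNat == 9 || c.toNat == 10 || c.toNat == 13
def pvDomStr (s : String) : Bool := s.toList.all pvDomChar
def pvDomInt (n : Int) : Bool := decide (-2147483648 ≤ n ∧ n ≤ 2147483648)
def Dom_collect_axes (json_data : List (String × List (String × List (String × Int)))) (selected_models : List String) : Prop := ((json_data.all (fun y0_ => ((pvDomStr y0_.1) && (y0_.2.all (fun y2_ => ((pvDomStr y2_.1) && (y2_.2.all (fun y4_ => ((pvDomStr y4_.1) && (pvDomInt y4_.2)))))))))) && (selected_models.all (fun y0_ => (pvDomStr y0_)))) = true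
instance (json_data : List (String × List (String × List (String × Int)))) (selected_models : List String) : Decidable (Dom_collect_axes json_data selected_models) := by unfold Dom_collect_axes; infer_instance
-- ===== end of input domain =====

-- B replaces A's fixed-key construction (testing f"original_{base}"/f"syn_{base}" for each of the 3
-- bases per instruction) by staged set comprehensions that PARSE each observed key, stripping its
-- "original_"/"syn_" prefix and normalising "goals_first" (idiomatic, not faster).


-- ===== PORT A =====
def METRICS_ORDER : List String := ["return", "steps", "goal_first"]

def collect_axes (json_data : List (String × List (String × List (String × Int)))) (selected_models : List String) : List String × List String × List String :=
  let jd : PySem.Dict String (List (String × List (String × Int))) := PySem.Dict.mk json_data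
  let models := selected_models.filter (fun m => jd.contains m)
  let instr_set : PySem.Set String :=
    models.foldl (fun s m =>
      PySem.Set.union s (PySem.Set.ofList ((PySem.Dict.mk (jd.getD m [])).keys))) PySem.Set.empty
  let instructions := PySem.List.sorted instr_set (fun x => x) false
  let present : PySem.Set String :=
    models.foldl (fun p m =>
      ((PySem.Dict.mk (jd.getD m [])).keys).foldl (fun p instr =>
        let keys := ((PySem.Dict.mk (jd.getD m [])).getD instr []).map Prod.fst
        METRICS_ORDER.foldl (fun p base =>
          if keys.contains ("original_" ++ base) || keys.contains ("syn_" ++ base)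
             || (base == "goal_first"
                 && (keys.contains "original_goals_first" || keys.contains "syn_goals_first"))
          then PySem.Set.add p base else p) p) p) PySem.Set.empty
  let metrics := METRICS_ORDER.filter (fun m => PySem.Set.contains present m)
  (models, instructions, metrics)

-- ===== PORT B =====
-- 'return "goal_first" if rest == "goals_first" else rest' (the shared final return of _base_of)
def pvFinish (rest : String) : String := if rest == "goals_first" then "goal_first" else rest

-- _base_of: strip the source prefix with startswith/slicing, '' if unrecognised
def base_of (key : String) : String :=
  if PySem.Str.startswith key "original_" then pvFinish (PySem.Str.slice key (some 9) none)
  else if PySem.Str.startswith key "syn_" then pvFinish (PySem.Str.slice key (some 4) none)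
  else ""

def collect_axes_alt (json_data : List (String × List (String × List (String × Int)))) (selected_models : List String) : List String × List String × List String :=
  let jd : PySem.Dict String (List (String × List (String × Int))) := PySem.Dict.mk json_data
  let models := selected_models.filter (fun m => jd.contains m)
  -- sorted({i for m in models for i in json_data[m]})
  let instructions := PySem.List.sorted
    (models.foldl (fun s m => (jd.getD m []).foldl (fun s q => PySem.Set.add s q.1) s)
      PySem.Set.empty) (fun x => x) false
  -- {_base_of(k) for m in models for d in json_data[m].values() for k in d}
  let bases : PySem.Set String :=
    models.foldl (fun s m =>
      (jd.getD m []).foldl (fun s q =>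
        (q.2.map Prod.fst).foldl (fun s k => PySem.Set.add s (base_of k)) s) s) PySem.Set.empty
  (models, instructions, METRICS_ORDER.filter (fun b => PySem.Set.contains bases b))

-- ===== PRECONDITION & SPEC =====
-- Pre_ excludes association lists with duplicate keys (a duplicated model name in json_data, or a
-- duplicated instruction name inside a model's dict): a Python dict cannot carry them, and on such
-- lists A's key-iteration-plus-first-match and B's direct item iteration are both accidental readings.
def Pre_collect_axes (json_data : List (String × List (String × List (String × Int)))) (_selected_models : List String) : Prop :=
  (json_data.map Prod.fst).Nodup ∧ ∀ p ∈ json_data, (p.2.map Prod.fst).Nodup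
instance (json_data : List (String × List (String × List (String × Int)))) (selected_models : List String) : Decidable (Pre_collect_axes json_data selected_models) := by unfold Pre_collect_axes; infer_instance

def pvWitness_collect_axes : (List (String × List (String × List (String × Int)))) × List String :=
  ([("m1", [("go", [("original_return", 1), ("syn_goals_first", 0)]), ("stop", [("syn_steps", 2)])]),
    ("m2", [("go", [("other", 3)])])], ["m2", "m1", "m3"])

def Spec_collect_axes (json_data : List (String × List (String × List (String × Int)))) (selected_models : List String) (out : List String × List String × List String) : Prop := out = collect_axes_alt json_data selected_models
instance (json_data : List (String × List (String × List (String × Int)))) (selected_models : List String) (out : List String × List String × List String) : Decidable (Spec_collect_axes json_data selected_models out) := by unfold Spec_collect_axes; infer_instance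

-- ===== CLAIM (what is proved, stated in full; the proofs are below) =====
def Claim_equal_collect_axes : Prop := ∀ (json_data : List (String × List (String × List (String × Int)))) (selected_models : List String), Dom_collect_axes json_data selected_models → Pre_collect_axes json_data selected_models → Spec_collect_axes json_data selected_models (collect_axes json_data selected_models)

-- ===== LEMMAS AND PROOFS =====

-- membership in an accumulating fold, given a membership rule for one step
theorem pv_mem_foldl_gen {α γ : Type} [BEq γ] (l : List α) (F : PySem.Set γ → α → PySem.Set γ)
    (P : α → γ → Prop) (h : ∀ s m y, m ∈ l → (y ∈ F s m ↔ y ∈ s ∨ P m y)) :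
    ∀ (s : PySem.Set γ) (y : γ), y ∈ l.foldl F s ↔ y ∈ s ∨ ∃ m ∈ l, P m y := by
  induction l with
  | nil => simp
  | cons m l ih =>
    intro s y
    rw [List.foldl_cons, ih (fun s m y hm => h s m y (List.mem_cons_of_mem _ hm)),
        h s m y (List.mem_cons_self ..)]
    simp only [List.mem_cons]
    constructor
    · rintro ((h1|h1)|⟨b,hb,h2⟩)
      · exact Or.inl h1
      · exact Or.inr ⟨m, Or.inl rfl, h1⟩
      · exact Or.inr ⟨b, Or.inr hb, h2⟩
    · rintro (h1|⟨b,(rfl|hb),h2⟩)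
      · exact Or.inl (Or.inl h1)
      · exact Or.inl (Or.inr h2)
      · exact Or.inr ⟨b, hb, h2⟩

-- a fold whose step preserves Nodup preserves Nodup
theorem pv_nodup_foldl {α γ : Type} (l : List α) (F : PySem.Set γ → α → PySem.Set γ)
    (h : ∀ s m, s.Nodup → (F s m).Nodup) : ∀ s : PySem.Set γ, s.Nodup → (l.foldl F s).Nodup := by
  induction l with
  | nil => intro s hs; exact hs
  | cons m l ih => intro s hs; exact ih _ (h s m hs)

-- membership in A's conditional-add loop over the fixed base-metric list
theorem pv_mem_foldl_add_if {γ : Type} [BEq γ] [LawfulBEq γ] (l : List γ) (c : γ → Bool) :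
    ∀ (s : PySem.Set γ) (y : γ),
      y ∈ l.foldl (fun s b => if c b then PySem.Set.add s b else s) s
        ↔ y ∈ s ∨ (y ∈ l ∧ c y = true) := by
  induction l with
  | nil => simp
  | cons b l ih =>
    intro s y
    rw [List.foldl_cons]
    by_cases hb : c b = true
    · rw [if_pos hb, ih, PySem.Set.mem_add]
      simp only [List.mem_cons]
      constructor
      · rintro ((h1|rfl)|⟨h1,h2⟩)
        · exact Or.inl h1
        · exact Or.inr ⟨Or.inl rfl, hb⟩
        · exact Or.inr ⟨Or.inr h1, h2⟩
      · rintro (h1|⟨(rfl|h1),h2⟩)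
        · exact Or.inl (Or.inl h1)
        · exact Or.inl (Or.inr rfl)
        · exact Or.inr ⟨h1, h2⟩
    · rw [if_neg hb, ih]
      simp only [List.mem_cons]
      constructor
      · rintro (h1|⟨h1,h2⟩)
        · exact Or.inl h1
        · exact Or.inr ⟨Or.inr h1, h2⟩
      · rintro (h1|⟨(rfl|h1),h2⟩)
        · exact Or.inl h1
        · exact absurd h2 hb
        · exact Or.inr ⟨h1, h2⟩

-- a string that starts with p is p followed by what slicing off |p| characters leaves
theorem pv_startswith_split (k p : String) (i : Int) (h0 : 0 ≤ i) (hn : p.toList.length = i.toNat)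
    (h : PySem.Str.startswith k p = true) :
    k.toList = p.toList ++ (PySem.Str.slice k (some i) none).toList := by
  have hpre : p.toList <+: k.toList := by
    rw [PySem.Str.startswith_eq] at h
    exact (PySem.Chars.startswith_iff _ _).mp h
  obtain ⟨t, ht⟩ := hpre
  have hslice : (PySem.Str.slice k (some i) none).toList = k.toList.drop i.toNat := by
    simp [PySem.Str.toList_slice, PySem.Chars.slice_eq_listSlice, PySem.List.slice_from _ h0]
  rw [hslice, ← ht, ← hn, List.drop_left]

-- the crux: for a base metric y, B's key parser returns y exactly on A's candidate key names
theorem pv_base_of_char (k y : String) (hy : y ∈ METRICS_ORDER) :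
    y = base_of k ↔
      k = "original_" ++ y ∨ k = "syn_" ++ y ∨
        (y = "goal_first" ∧ (k = "original_goals_first" ∨ k = "syn_goals_first")) := by
  constructor
  · intro hb
    unfold base_of at hb
    split_ifs at hb with h1 h2
    · have hk := pv_startswith_split k "original_" 9 (by norm_num) (by decide) h1
      unfold pvFinish at hb
      split_ifs at hb with hgf
      · obtain rfl : y = "goal_first" := hb
        have : (PySem.Str.slice k (some (9:Int)) none) = "goals_first" := by simpa using hgf
        rw [this] at hk
        refine Or.inr (Or.inr ⟨rfl, Or.inl ?_⟩)
        exact String.toList_inj.mp (by rw [hk]; decide)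
      · refine Or.inl (String.toList_inj.mp ?_)
        rw [String.toList_append, hk, ← hb]
    · have hk := pv_startswith_split k "syn_" 4 (by norm_num) (by decide) h2
      unfold pvFinish at hb
      split_ifs at hb with hgf
      · obtain rfl : y = "goal_first" := hb
        have : (PySem.Str.slice k (some (4:Int)) none) = "goals_first" := by simpa using hgf
        rw [this] at hk
        refine Or.inr (Or.inr ⟨rfl, Or.inr ?_⟩)
        exact String.toList_inj.mp (by rw [hk]; decide)
      · refine Or.inr (Or.inl (String.toList_inj.mp ?_))
        rw [String.toList_append, hk, ← hb]
    · exact absurd hy (by subst hb; decide)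
  · rintro (rfl | rfl | ⟨rfl, (rfl | rfl)⟩)
    · fin_cases hy <;> decide
    · fin_cases hy <;> decide
    · decide
    · decide

-- A's membership test over the 3 fixed bases = B's per-key classification, per key list
theorem pv_key_class (ks : List String) (y : String) (hy : y ∈ METRICS_ORDER) :
    (ks.contains ("original_" ++ y) || ks.contains ("syn_" ++ y)
       || (y == "goal_first"
           && (ks.contains "original_goals_first" || ks.contains "syn_goals_first"))) = true
      ↔ ∃ k ∈ ks, y = base_of k := by
  have hiff : ∀ k, (y = base_of k) ↔
      (k = "original_" ++ y ∨ k = "syn_" ++ y ∨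
        (y = "goal_first" ∧ (k = "original_goals_first" ∨ k = "syn_goals_first"))) :=
    fun k => pv_base_of_char k y hy
  simp only [hiff, Bool.or_eq_true, Bool.and_eq_true, List.contains_iff_mem, beq_iff_eq]
  constructor
  · rintro ((h|h)|⟨h1,(h|h)⟩)
    · exact ⟨_, h, Or.inl rfl⟩
    · exact ⟨_, h, Or.inr (Or.inl rfl)⟩
    · exact ⟨_, h, Or.inr (Or.inr ⟨h1, Or.inl rfl⟩)⟩
    · exact ⟨_, h, Or.inr (Or.inr ⟨h1, Or.inr rfl⟩)⟩
  · rintro ⟨k, hk, (rfl|rfl|⟨h1,(rfl|rfl)⟩)⟩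
    · exact Or.inl (Or.inl hk)
    · exact Or.inl (Or.inr hk)
    · exact Or.inr ⟨h1, Or.inl hk⟩
    · exact Or.inr ⟨h1, Or.inr hk⟩

-- one model's contribution to A's present set
theorem pv_A2_step (v : List (String × List (String × Int))) (hvnd : (v.map Prod.fst).Nodup)
    (s : PySem.Set String) (y : String) :
    y ∈ ((PySem.Dict.mk v).keys).foldl (fun p instr =>
          METRICS_ORDER.foldl (fun p base =>
            if (((PySem.Dict.mk v).getD instr []).map Prod.fst).contains ("original_" ++ base)
               || (((PySem.Dict.mk v).getD instr []).map Prod.fst).contains ("syn_" ++ base)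
               || (base == "goal_first"
                   && ((((PySem.Dict.mk v).getD instr []).map Prod.fst).contains "original_goals_first"
                       || (((PySem.Dict.mk v).getD instr []).map Prod.fst).contains "syn_goals_first"))
            then PySem.Set.add p base else p) p) s
      ↔ y ∈ s ∨ (y ∈ METRICS_ORDER ∧ ∃ q ∈ v, ∃ k ∈ q.2.map Prod.fst, y = base_of k) := by
  rw [pv_mem_foldl_gen ((PySem.Dict.mk v).keys) _
        (fun instr y => y ∈ METRICS_ORDER ∧
          ((((PySem.Dict.mk v).getD instr []).map Prod.fst).contains ("original_" ++ y)
           || (((PySem.Dict.mk v).getD instr []).map Prod.fst).contains ("syn_" ++ y)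
           || (y == "goal_first"
               && ((((PySem.Dict.mk v).getD instr []).map Prod.fst).contains "original_goals_first"
                   || (((PySem.Dict.mk v).getD instr []).map Prod.fst).contains "syn_goals_first"))) = true)
        (fun p instr y _ => pv_mem_foldl_add_if METRICS_ORDER _ p y) s y]
  constructor
  · rintro (h1|⟨instr, hin, hy, hcl⟩)
    · exact Or.inl h1
    · simp only [PySem.Dict.keys, List.mem_map] at hin
      obtain ⟨q, hq, rfl⟩ := hin
      rw [PySem.Dict.getD_of_mem_items _ hq (show ((PySem.Dict.mk v).keys).Nodup from hvnd) []] at hcl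
      obtain ⟨k, hk, hg⟩ := (pv_key_class _ _ hy).mp hcl
      exact Or.inr ⟨hy, q, hq, k, hk, hg⟩
  · rintro (h1|⟨hy, q, hq, k, hk, hg⟩)
    · exact Or.inl h1
    · refine Or.inr ⟨q.1, ?_, hy, ?_⟩
      · simp only [PySem.Dict.keys, List.mem_map]
        exact ⟨q, hq, rfl⟩
      · rw [PySem.Dict.getD_of_mem_items _ hq (show ((PySem.Dict.mk v).keys).Nodup from hvnd) []]
        exact (pv_key_class _ _ hy).mpr ⟨k, hk, hg⟩

-- one model's contribution to B's bases set
theorem pv_B2_step (d : List (String × List (String × Int))) (s : PySem.Set String) (y : String) :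
    y ∈ d.foldl (fun s q => (q.2.map Prod.fst).foldl (fun s k => PySem.Set.add s (base_of k)) s) s
      ↔ y ∈ s ∨ ∃ q ∈ d, ∃ k ∈ q.2.map Prod.fst, y = base_of k :=
  pv_mem_foldl_gen d _ (fun q y => ∃ k ∈ q.2.map Prod.fst, y = base_of k)
    (fun s _ y _ => PySem.Set.mem_foldl_add ..) s y

-- ===== VERDICT (by name: the statement is the Claim_ definition above) =====
theorem collect_axes_spec : Claim_equal_collect_axes := by
  intro json_data selected_models _ hpre
  obtain ⟨hnd1, hnd2⟩ := hpre
  unfold Spec_collect_axes collect_axes collect_axes_alt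
  dsimp only
  -- facts about the looked-up model dicts
  have hval : ∀ m ∈ selected_models.filter (fun m => (PySem.Dict.mk json_data).contains m),
      ∃ v, (m, v) ∈ json_data ∧ (PySem.Dict.mk json_data).getD m [] = v ∧ (v.map Prod.fst).Nodup := by
    intro m hm
    have hc : (PySem.Dict.mk json_data).contains m = true := (List.mem_filter.mp hm).2
    rw [PySem.Dict.contains_eq_isSome_get?] at hc
    obtain ⟨v, hv⟩ := Option.isSome_iff_exists.mp hc
    exact ⟨v, PySem.Dict.mem_items_of_get?_eq_some _ hv, PySem.Dict.getD_of_get?_eq_some _ [] hv,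
           hnd2 (m, v) (PySem.Dict.mem_items_of_get?_eq_some _ hv)⟩
  refine congrArg₂ Prod.mk rfl (congrArg₂ Prod.mk ?_ ?_)
  · -- instructions: sorted of two folds that build the same set
    apply PySem.List.sorted_eq_sorted_of_perm _ _ _ Function.injective_id
    apply (List.perm_ext_iff_of_nodup ?_ ?_).mpr ?_
    · exact pv_nodup_foldl _ _ (fun s m hs => PySem.Set.nodup_union s _ hs) _ List.nodup_nil
    · exact pv_nodup_foldl _ _
        (fun s m hs => pv_nodup_foldl _ _ (fun s q hs => PySem.Set.nodup_add s _ hs) s hs)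
        _ List.nodup_nil
    · intro x
      rw [pv_mem_foldl_gen _ _ (fun m y => ∃ q ∈ (PySem.Dict.mk json_data).getD m [], y = q.1)
            (fun s m y _ => by
              rw [PySem.Set.mem_union, PySem.Set.mem_ofList]
              simp only [PySem.Dict.keys, List.mem_map]
              constructor
              · rintro (h1|⟨q,hq,rfl⟩)
                · exact Or.inl h1
                · exact Or.inr ⟨q, hq, rfl⟩
              · rintro (h1|⟨q,hq,rfl⟩)
                · exact Or.inl h1
                · exact Or.inr ⟨q, hq, rfl⟩) PySem.Set.empty x,
          pv_mem_foldl_gen _ _ (fun m y => ∃ q ∈ (PySem.Dict.mk json_data).getD m [], y = q.1)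
            (fun s m y _ => PySem.Set.mem_foldl_add ..) PySem.Set.empty x]
  · -- metrics: filters over METRICS_ORDER with set-equal present/bases sets on its members
    apply List.filter_congr
    intro x hx
    apply Bool.eq_iff_iff.mpr
    rw [PySem.Set.contains_iff, PySem.Set.contains_iff]
    rw [pv_mem_foldl_gen _ _
          (fun m y => y ∈ METRICS_ORDER ∧ ∃ q ∈ (PySem.Dict.mk json_data).getD m [],
            ∃ k ∈ q.2.map Prod.fst, y = base_of k)
          (fun s m y hm => by
            obtain ⟨v, hv, hgetD, hvnd⟩ := hval m hm
            beta_reduce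
            rw [hgetD]
            exact pv_A2_step v hvnd s y) PySem.Set.empty x,
        pv_mem_foldl_gen _ _
          (fun m y => ∃ q ∈ (PySem.Dict.mk json_data).getD m [],
            ∃ k ∈ q.2.map Prod.fst, y = base_of k)
          (fun s m y _ => by beta_reduce; exact pv_B2_step _ s y) PySem.Set.empty x]
    constructor
    · rintro (h|⟨m, hm, _, hrest⟩)
      · exact absurd h (by simp)
      · exact Or.inr ⟨m, hm, hrest⟩
    · rintro (h|⟨m, hm, hrest⟩)
      · exact absurd h (by simp)
      · exact Or.inr ⟨m, hm, hx, hrest⟩
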